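-- pv_equiv track=rewrite | github.com/JiechengMei/CS481PA2 | cs481_P02_A20439795_A.py | split_tag_words
-- ===== SOURCE A (Python) =====
-- def split_tag_words(sentence, tag):
--     _massive_words = []
--     chars_to_remove = [',', '.', '-', '!', '\"', ':', ')', '(']
--     for char in chars_to_remove:
--         sentence = sentence.replace(char, '')
--     sentence = sentence.split()
--     sentence = [element for element in sentence]
--     for each in sentence:
--         _massive_words.append((str(each), int(tag)))
--     return _massive_words
-- ===== SOURCE B (Python) =====
-- def split_tag_words(sentence, tag):
--     punct = {',', '.', '-', '!', '"', ':', ')', '('}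
--     words = []
--     buf = []
--     for ch in sentence:
--         if ch.isspace():
--             if buf:
--                 words.append(''.join(buf))
--                 buf = []
--         elif ch not in punct:
--             buf.append(ch)
--     if buf:
--         words.append(''.join(buf))
--     return [(w, int(tag)) for w in words]
-- ===== Notes on version B (the rewrite author's own statement) =====
-- stated objective: simpler
-- what changed: Replaced A's eight full replace passes plus split with a single one-pass character scan that skips punctuation, flushes the word buffer on whitespace, and tags each collected word.
import Mathlib
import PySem

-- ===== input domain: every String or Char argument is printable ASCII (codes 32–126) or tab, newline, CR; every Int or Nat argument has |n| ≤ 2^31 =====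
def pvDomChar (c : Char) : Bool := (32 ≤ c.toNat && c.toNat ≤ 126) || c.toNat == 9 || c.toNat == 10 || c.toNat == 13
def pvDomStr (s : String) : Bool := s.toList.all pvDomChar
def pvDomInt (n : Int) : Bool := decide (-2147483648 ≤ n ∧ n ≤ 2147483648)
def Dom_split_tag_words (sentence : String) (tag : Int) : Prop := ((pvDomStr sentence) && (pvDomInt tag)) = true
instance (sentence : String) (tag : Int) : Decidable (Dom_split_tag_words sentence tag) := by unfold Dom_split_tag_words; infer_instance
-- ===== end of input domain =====

-- B replaces A's eight replace passes + split with one single-pass tokenizer scan (simpler, one traversal).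


-- ===== PORT A =====
-- chars_to_remove
def pvCharsToRemove : List Char := [',', '.', '-', '!', '\"', ':', ')', '(']

def split_tag_words (sentence : String) (tag : Int) : List (String × Int) :=
  -- for char in chars_to_remove: sentence = sentence.replace(char, '')
  let sentence := pvCharsToRemove.foldl
    (fun s char => PySem.Str.replace s (String.ofList [char]) "") sentence
  -- sentence = sentence.split()
  let sentence := PySem.Str.split₀ sentence
  -- sentence = [element for element in sentence]
  let sentence := sentence.map (fun element => element)
  -- for each in sentence: _massive_words.append((str(each), int(tag)))
  sentence.foldl (fun massive each => massive ++ [(each, tag)]) []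

-- ===== PORT B =====
-- punct set (Source B builds it as a set literal of 8 distinct chars)
def pvPunct : List Char := [',', '.', '-', '!', '\"', ':', ')', '(']

-- the for-loop of Source B over the characters, state = (words, buf); trailing flush at the end
def pvScan : List Char → List (List Char) → List Char → List (List Char)
  | [], words, buf => if buf.isEmpty then words else words ++ [buf]
  | ch :: rest, words, buf =>
    if PySem.Chars.isspace ch then
      if buf.isEmpty then pvScan rest words [] else pvScan rest (words ++ [buf]) []
    else if pvPunct.contains ch then pvScan rest words buf
    else pvScan rest words (buf ++ [ch])

def split_tag_words_alt (sentence : String) (tag : Int) : List (String × Int) :=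
  (pvScan sentence.toList [] []).map (fun w => (String.ofList w, tag))

-- ===== PRECONDITION & SPEC =====
def Spec_split_tag_words (sentence : String) (tag : Int) (out : List (String × Int)) : Prop := out = split_tag_words_alt sentence tag
instance (sentence : String) (tag : Int) (out : List (String × Int)) : Decidable (Spec_split_tag_words sentence tag out) := by unfold Spec_split_tag_words; infer_instance

-- ===== CLAIM (what is proved, stated in full; the proofs are below) =====
def Claim_equal_split_tag_words : Prop := ∀ (sentence : String) (tag : Int), Dom_split_tag_words sentence tag → Spec_split_tag_words sentence tag (split_tag_words sentence tag)

-- ===== LEMMAS AND PROOFS =====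

-- replace by a single character with '' is a filter
theorem replace_go_single (c : Char) : ∀ (l : List Char) (fuel : Nat) (acc : List Char),
    l.length ≤ fuel →
    PySem.Chars.replace.go [c] [] fuel l acc = acc.reverse ++ l.filter (fun x => !(x == c)) := by
  intro l
  induction l with
  | nil => intro fuel acc _; cases fuel <;> simp [PySem.Chars.replace.go]
  | cons a t ih =>
    intro fuel acc h
    cases fuel with
    | zero => simp at h
    | succ fuel =>
      by_cases hac : a = c
      · subst hac
        simp [PySem.Chars.replace.go, List.isPrefixOf,
          ih fuel acc (by simpa using h)]
      · have hbeq : (c == a) = false := by simp; exact fun h' => hac h'.symm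
        have hbeq' : (a == c) = false := by simp [hac]
        simp [PySem.Chars.replace.go, List.isPrefixOf, hbeq, hbeq',
          ih fuel (a :: acc) (by simpa using h)]

theorem replace_single (cs : List Char) (c : Char) :
    PySem.Chars.replace cs [c] [] = cs.filter (fun x => !(x == c)) := by
  simpa [PySem.Chars.replace] using replace_go_single c cs cs.length [] le_rfl

-- the fold of single-char replaces is one filter against the whole list
theorem foldl_replace_filter : ∀ (punct : List Char) (cs : List Char),
    punct.foldl (fun s c => PySem.Chars.replace s [c] []) cs
      = cs.filter (fun x => !punct.contains x) := by
  intro punct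
  induction punct with
  | nil => intro cs; simp
  | cons c ps ih =>
    intro cs
    rw [List.foldl_cons, replace_single, ih, List.filter_filter]
    apply List.filter_congr
    intro x _
    by_cases h : x = c <;> simp [h]

-- pvScan only appends to its words accumulator
theorem pvScan_acc : ∀ (cs : List Char) (ws : List (List Char)) (buf : List Char),
    pvScan cs ws buf = ws ++ pvScan cs [] buf := by
  intro cs
  induction cs with
  | nil => intro ws buf; by_cases h : buf.isEmpty <;> simp [pvScan, h]
  | cons c t ih =>
    intro ws buf
    rw [pvScan, pvScan]
    by_cases hs : PySem.Chars.isspace c = true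
    · rw [if_pos hs, if_pos hs]
      by_cases hb : buf.isEmpty = true
      · rw [if_pos hb, if_pos hb]; exact ih ws []
      · rw [if_neg hb, if_neg hb, ih (ws ++ [buf]) [], ih ([] ++ [buf]) []]
        simp
    · rw [if_neg hs, if_neg hs]
      by_cases hp : pvPunct.contains c = true
      · rw [if_pos hp, if_pos hp]; exact ih ws buf
      · rw [if_neg hp, if_neg hp]; exact ih ws (buf ++ [c])

-- on punctuation-free input, split₀.go and pvScan compute the same words
theorem split_go_eq_pvScan : ∀ (cs : List Char) (cur : List Char) (acc : List (List Char)),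
    (∀ c ∈ cs, pvPunct.contains c = false) →
    PySem.Chars.split₀.go cs cur acc = acc.reverse ++ pvScan cs [] cur.reverse := by
  intro cs
  induction cs with
  | nil =>
    intro cur acc _
    by_cases h : cur = []
    · simp [PySem.Chars.split₀.go, pvScan, h]
    · have h1 : cur.isEmpty = false := by simp [h]
      have h2 : cur.reverse.isEmpty = false := by simp [h]
      simp [PySem.Chars.split₀.go, pvScan, h1, h2]
  | cons c t ih =>
    intro cur acc hfree
    have hc : pvPunct.contains c = false := hfree c (by simp)
    have hcne : ¬ (pvPunct.contains c = true) := by simp only [hc]; exact Bool.false_ne_true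
    have ht : ∀ x ∈ t, pvPunct.contains x = false := fun x hx => hfree x (by simp [hx])
    by_cases hs : PySem.Chars.isspace c = true
    · by_cases hb : cur = []
      · subst hb
        rw [PySem.Chars.split₀.go, if_pos hs, if_pos (by simp), ih [] acc ht]
        rw [pvScan, if_pos hs, if_pos (by simp)]
        simp
      · rw [PySem.Chars.split₀.go, if_pos hs, if_neg (by simp [hb]), ih [] (cur.reverse :: acc) ht]
        rw [pvScan, if_pos hs, if_neg (by simp [hb]), pvScan_acc t ([] ++ [cur.reverse]) []]
        simp
    · rw [PySem.Chars.split₀.go, if_neg hs, ih (c :: cur) acc ht]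
      rw [pvScan, if_neg hs, if_neg hcne]
      simp

theorem split₀_eq_pvScan (cs : List Char) (h : ∀ c ∈ cs, pvPunct.contains c = false) :
    PySem.Chars.split₀ cs = pvScan cs [] [] := by
  simpa [PySem.Chars.split₀] using split_go_eq_pvScan cs [] [] h

-- every punctuation character is non-whitespace
theorem punct_not_space (c : Char) (h : pvPunct.contains c = true) :
    PySem.Chars.isspace c = false := by
  have hm : c ∈ pvPunct := by simpa using h
  simp [pvPunct] at hm
  rcases hm with rfl | rfl | rfl | rfl | rfl | rfl | rfl | rfl <;> decide

-- pvScan ignores punctuation characters: scanning cs equals scanning cs with punctuation filtered out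
theorem pvScan_filter : ∀ (cs : List Char) (ws : List (List Char)) (buf : List Char),
    pvScan cs ws buf = pvScan (cs.filter (fun x => !pvPunct.contains x)) ws buf := by
  intro cs
  induction cs with
  | nil => intro ws buf; simp
  | cons c t ih =>
    intro ws buf
    by_cases hp : pvPunct.contains c = true
    · have hs : PySem.Chars.isspace c = false := punct_not_space c hp
      rw [List.filter_cons_of_neg (by simpa using hp)]
      rw [pvScan, if_neg (by simp [hs]), if_pos hp]
      exact ih ws buf
    · have hpb : pvPunct.contains c = false := Bool.eq_false_iff.mpr hp
      rw [List.filter_cons_of_pos (by simpa using hpb)]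
      rw [pvScan, pvScan]
      by_cases hs : PySem.Chars.isspace c = true
      · rw [if_pos hs, if_pos hs]
        by_cases hb : buf.isEmpty = true
        · rw [if_pos hb, if_pos hb]; exact ih ws []
        · rw [if_neg hb, if_neg hb]; exact ih (ws ++ [buf]) []
      · rw [if_neg hs, if_neg hs, if_neg hp, if_neg hp]; exact ih ws (buf ++ [c])

-- the A-side foldl append is a map
theorem foldl_append_map (tag : Int) : ∀ (ws : List String) (acc : List (String × Int)),
    ws.foldl (fun massive each => massive ++ [(each, tag)]) acc = acc ++ ws.map (fun w => (w, tag)) := by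
  intro ws
  induction ws with
  | nil => intro acc; simp
  | cons w t ih => intro acc; simp [ih]

-- the Str-level replace fold is the Chars-level one
theorem str_foldl_replace (punct : List Char) : ∀ (s : String),
    punct.foldl (fun s char => PySem.Str.replace s (String.ofList [char]) "") s
      = String.ofList (punct.foldl (fun cs c => PySem.Chars.replace cs [c] []) s.toList) := by
  induction punct with
  | nil => intro s; simp
  | cons c ps ih =>
    intro s
    rw [List.foldl_cons, ih, List.foldl_cons]
    have h : (PySem.Str.replace s (String.ofList [c]) "").toList
        = PySem.Chars.replace s.toList [c] [] := by simp
    rw [h]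

-- ===== VERDICT (by name: the statement is the Claim_ definition above) =====
theorem split_tag_words_spec : Claim_equal_split_tag_words := by
  intro sentence tag _
  unfold Spec_split_tag_words split_tag_words split_tag_words_alt
  have hfold : pvCharsToRemove.foldl
      (fun s char => PySem.Str.replace s (String.ofList [char]) "") sentence
      = String.ofList (sentence.toList.filter (fun x => !pvPunct.contains x)) := by
    rw [str_foldl_replace, foldl_replace_filter]
    rfl
  have hfree : ∀ c ∈ sentence.toList.filter (fun x => !pvPunct.contains x),
      pvPunct.contains c = false := by
    intro c hc
    simpa using List.of_mem_filter hc
  have hsplit : PySem.Str.split₀ (String.ofList (sentence.toList.filter (fun x => !pvPunct.contains x)))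
      = (pvScan sentence.toList [] []).map String.ofList := by
    have h : PySem.Chars.split₀ (sentence.toList.filter (fun x => !pvPunct.contains x))
        = pvScan sentence.toList [] [] := by
      rw [split₀_eq_pvScan _ hfree, ← pvScan_filter]
    unfold PySem.Str.split₀
    rw [String.toList_ofList, h]
  simp only [hfold, hsplit]
  simp only [foldl_append_map, List.nil_append, List.map_map]
  rfl
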